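-- pv_equiv track=rewrite | github.com/FumoFridayOfficial/TouhouMugenKai | Mugenkai.py | validate_library
-- ===== SOURCE A (Python) =====
-- def validate_library(library_data):
--     if "Library" not in library_data:
--         return False
--     if "games" not in library_data:
--         return False
--     for game_data in library_data["games"]:
--         if "title" not in game_data:
--             return False
--         if "installed" not in game_data:
--             return False
--         if "unpatched_file" not in game_data:
--             return False
--         if "desc" not in game_data:
--             return False
--         if "developer" not in game_data:
--             return False
--         if "publisher" not in game_data:
--             return False
--         if "released" not in game_data:
--             return False
--         if "genre" not in game_data:
--             return False
--         if "id" not in game_data: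
--             return False
--     return True
-- ===== SOURCE B (Python) =====
-- REQUIRED = {
--     "title", "installed", "unpatched_file", "desc", "developer",
--     "publisher", "released", "genre", "id",
-- }
--
--
-- def validate_library(library_data):
--     if "Library" not in library_data or "games" not in library_data:
--         return False
--     games = library_data["games"]
--     if not games:
--         return True
--     # keys common to every game, built once by set intersection
--     common = set(games[0])
--     for game in games[1:]:
--         common &= set(game)
--     return REQUIRED <= common
-- ===== Notes on version B (the rewrite author's own statement) =====
-- stated objective: alternative
-- what changed: Instead of checking nine keys per game with early returns, B folds the games' key sets into a single running intersection (the keys common to every game) and then performs one superset test REQUIRED <= common.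
import Mathlib
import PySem

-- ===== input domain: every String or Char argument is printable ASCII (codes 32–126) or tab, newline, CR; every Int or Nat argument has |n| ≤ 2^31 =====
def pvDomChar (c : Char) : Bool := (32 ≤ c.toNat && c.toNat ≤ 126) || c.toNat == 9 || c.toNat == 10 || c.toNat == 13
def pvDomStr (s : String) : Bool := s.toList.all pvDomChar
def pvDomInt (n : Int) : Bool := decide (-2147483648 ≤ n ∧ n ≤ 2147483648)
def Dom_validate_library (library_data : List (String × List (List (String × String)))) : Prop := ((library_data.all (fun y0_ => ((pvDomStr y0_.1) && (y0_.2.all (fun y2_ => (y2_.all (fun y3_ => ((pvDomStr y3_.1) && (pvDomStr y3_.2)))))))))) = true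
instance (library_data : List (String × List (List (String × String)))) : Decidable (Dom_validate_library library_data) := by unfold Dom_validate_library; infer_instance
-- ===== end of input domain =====

-- B replaces A's per-game loop of nine early-return key checks by folding the games'
-- key sets into one running intersection and doing a single superset test (alternative).

-- ===== PORT A =====
-- 'k in d' on a Python dict modelled as an association list: any pair with first component k
def pyKeyIn {α : Type} (d : List (String × α)) (k : String) : Bool := d.any (fun p => p.1 == k)

-- the for-loop over library_data["games"] with its early returns
def validateGamesLoop : List (List (String × String)) → Bool
  | [] => true
  | g :: rest =>
    if !pyKeyIn g "title" then false
    else if !pyKeyIn g "installed" then false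
    else if !pyKeyIn g "unpatched_file" then false
    else if !pyKeyIn g "desc" then false
    else if !pyKeyIn g "developer" then false
    else if !pyKeyIn g "publisher" then false
    else if !pyKeyIn g "released" then false
    else if !pyKeyIn g "genre" then false
    else if !pyKeyIn g "id" then false
    else validateGamesLoop rest

def validate_library (library_data : List (String × List (List (String × String)))) : Bool :=
  if !pyKeyIn library_data "Library" then false
  else if !pyKeyIn library_data "games" then false
  -- lookup is total here: the guard above ensures the key is present
  else validateGamesLoop ((List.lookup "games" library_data).getD [])

-- ===== PORT B =====
-- the module-level set literal REQUIRED of Source B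
def requiredKeys : PySem.Set String :=
  PySem.Set.ofList ["title", "installed", "unpatched_file", "desc", "developer",
                    "publisher", "released", "genre", "id"]

-- set(game): the key set of one game dict
def gameKeys (g : List (String × String)) : PySem.Set String :=
  PySem.Set.ofList (g.map Prod.fst)

-- the loop 'for game in games[1:]: common &= set(game)'
def commonLoop : PySem.Set String → List (List (String × String)) → PySem.Set String
  | c, [] => c
  | c, g :: rest => commonLoop (PySem.Set.inter c (gameKeys g)) rest

def validate_library_alt (library_data : List (String × List (List (String × String)))) : Bool :=
  if !pyKeyIn library_data "Library" || !pyKeyIn library_data "games" then false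
  else
    match (List.lookup "games" library_data).getD [] with
    | [] => true
    | g :: rest => PySem.Set.issubset requiredKeys (commonLoop (gameKeys g) rest)

-- ===== PRECONDITION & SPEC =====
def Spec_validate_library (library_data : List (String × List (List (String × String)))) (out : Bool) : Prop := out = validate_library_alt library_data
instance (library_data : List (String × List (List (String × String)))) (out : Bool) : Decidable (Spec_validate_library library_data out) := by unfold Spec_validate_library; infer_instance

-- ===== CLAIM (what is proved, stated in full; the proofs are below) =====
def Claim_equal_validate_library : Prop := ∀ (library_data : List (String × List (List (String × String)))), Dom_validate_library library_data → Spec_validate_library library_data (validate_library library_data)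

-- ===== LEMMAS AND PROOFS =====

-- membership in the folded intersection = membership in the seed and in every later game's keys
lemma mem_commonLoop (x : String) (l : List (List (String × String))) (c : PySem.Set String) :
    x ∈ commonLoop c l ↔ x ∈ c ∧ ∀ g ∈ l, x ∈ gameKeys g := by
  induction l generalizing c with
  | nil => simp [commonLoop]
  | cons g rest ih =>
    simp only [commonLoop, ih, PySem.Set.mem_inter, List.mem_cons]
    constructor
    · rintro ⟨⟨hc, hg⟩, hrest⟩
      exact ⟨hc, fun g' hg' => hg'.elim (fun h => h ▸ hg) (hrest g')⟩
    · rintro ⟨hc, hall⟩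
      exact ⟨⟨hc, hall g (Or.inl rfl)⟩, fun g' h => hall g' (Or.inr h)⟩

-- 'k in game' (A's test) = key-set membership (B's)
lemma pyKeyIn_iff (g : List (String × String)) (k : String) :
    pyKeyIn g k = true ↔ k ∈ gameKeys g := by
  simp [pyKeyIn, gameKeys, PySem.Set.mem_ofList, List.any_eq_true, List.mem_map]

-- if not a: return False; else x  ==  a && x
lemma if_not_false (a x : Bool) : (if !a then false else x) = (a && x) := by
  cases a <;> rfl

-- A's loop characterised: every game contains every required key
lemma loop_eq_true_iff (gs : List (List (String × String))) :
    validateGamesLoop gs = true ↔ ∀ g ∈ gs, ∀ k ∈ requiredKeys, k ∈ gameKeys g := by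
  induction gs with
  | nil => simp [validateGamesLoop]
  | cons g rest ih =>
    rw [validateGamesLoop]
    simp only [if_not_false, Bool.and_eq_true, ih]
    constructor
    · rintro ⟨h1, h2, h3, h4, h5, h6, h7, h8, h9, hrest⟩
      intro g' hg'
      rcases List.mem_cons.1 hg' with h | h
      · subst h
        intro k hk
        have : k ∈ ["title", "installed", "unpatched_file", "desc", "developer",
                    "publisher", "released", "genre", "id"] :=
          (PySem.Set.mem_ofList _ _).1 hk
        fin_cases this <;> rw [← pyKeyIn_iff] <;> assumption
      · exact hrest g' h
    · intro hall
      have hg := hall g (List.mem_cons_self)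
      refine ⟨?_, ?_, ?_, ?_, ?_, ?_, ?_, ?_, ?_, fun g' h => hall g' (List.mem_cons_of_mem _ h)⟩ <;>
        · rw [pyKeyIn_iff]
          exact hg _ (by decide)

-- B's inner expression characterised the same way
lemma alt_inner_eq_true_iff (g : List (String × String)) (rest : List (List (String × String))) :
    PySem.Set.issubset requiredKeys (commonLoop (gameKeys g) rest) = true ↔
      ∀ g' ∈ g :: rest, ∀ k ∈ requiredKeys, k ∈ gameKeys g' := by
  rw [PySem.Set.issubset_iff]
  constructor
  · intro h g' hg' k hk
    have := (mem_commonLoop k rest (gameKeys g)).1 (h k hk)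
    rcases List.mem_cons.1 hg' with h' | h'
    · exact h' ▸ this.1
    · exact this.2 g' h'
  · intro h k hk
    exact (mem_commonLoop k rest (gameKeys g)).2
      ⟨h g (List.mem_cons_self) k hk, fun g' hg' => h g' (List.mem_cons_of_mem _ hg') k hk⟩

-- the loop equals B's intersection-then-superset computation
lemma loop_eq_alt_inner (gs : List (List (String × String))) :
    validateGamesLoop gs =
      (match gs with
       | [] => true
       | g :: rest => PySem.Set.issubset requiredKeys (commonLoop (gameKeys g) rest)) := by
  cases gs with
  | nil => rfl
  | cons g rest =>
    rw [Bool.eq_iff_iff, loop_eq_true_iff]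
    exact (alt_inner_eq_true_iff g rest).symm

-- ===== VERDICT (by name: the statement is the Claim_ definition above) =====
theorem validate_library_spec : Claim_equal_validate_library := by
  intro library_data _
  unfold Spec_validate_library validate_library validate_library_alt
  cases hL : pyKeyIn library_data "Library" <;>
    cases hG : pyKeyIn library_data "games" <;>
    simp [loop_eq_alt_inner]
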